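-- pv_equiv track=rewrite | github.com/leeyongjoo/crawler-algorithm-problem-old | programmers/level2/[힙(Heap)] 라면공장.py | solution
-- ===== SOURCE A (Python) =====
-- def solution(stock, dates, supplies, k):
--     import heapq
--     from collections import deque
--     ans = 0
--     ds_deq = deque(zip(dates, supplies))
--     day = stock
--     heap = []
--     while day < k:
--         for i in range(len(ds_deq)):
--             if ds_deq[0][0] <= day:
--                 heapq.heappush(heap, -ds_deq.popleft()[1])
--             else:
--                 break
--         day += -heapq.heappop(heap)
--         ans += 1
--     return ans
-- ===== SOURCE B (Python) =====
-- def solution(stock, dates, supplies, k):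
--     pairs = list(zip(dates, supplies))
--     available = []
--     day = stock
--     ans = 0
--     i = 0
--     while day < k:
--         while i < len(pairs) and pairs[i][0] <= day:
--             available.append(pairs[i][1])
--             i += 1
--         best_idx = 0
--         best = available[0]
--         for j in range(1, len(available)):
--             if available[j] > best:
--                 best = available[j]
--                 best_idx = j
--         available.pop(best_idx)
--         day += best
--         ans += 1
--     return ans
-- ===== Notes on version B (the rewrite author's own statement) =====
-- stated objective: simpler
-- what changed: B drops the heapq max-heap (and its negated-value encoding) entirely: it keeps the reachable supply amounts in a plain list and each day finds and removes the largest by one explicit linear scan seeded with available[0].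
import Mathlib
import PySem

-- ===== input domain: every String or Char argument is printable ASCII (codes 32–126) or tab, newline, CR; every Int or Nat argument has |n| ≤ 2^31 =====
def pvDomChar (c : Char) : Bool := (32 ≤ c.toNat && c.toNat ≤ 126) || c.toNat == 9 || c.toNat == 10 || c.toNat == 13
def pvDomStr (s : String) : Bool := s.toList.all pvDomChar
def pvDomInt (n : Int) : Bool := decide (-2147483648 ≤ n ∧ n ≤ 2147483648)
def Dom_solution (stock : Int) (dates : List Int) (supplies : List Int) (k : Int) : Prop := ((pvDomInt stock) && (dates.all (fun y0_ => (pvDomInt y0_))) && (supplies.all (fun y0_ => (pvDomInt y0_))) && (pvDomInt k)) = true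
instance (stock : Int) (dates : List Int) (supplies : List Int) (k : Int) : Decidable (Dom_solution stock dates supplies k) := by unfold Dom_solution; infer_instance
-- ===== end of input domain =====

-- B replaces A's heapq max-heap by a plain list scanned linearly for its maximum each day (simpler, no heap machinery); equal return value, A's argument lists are not mutated by either version.

-- ===== PORT A =====
-- heapq is not in PySem: CPython's heapq._siftdown/_siftup/heappush/heappop are ported
-- by hand below, step for step (exact: same comparisons, same element moves).  The loops
-- are written with a structural fuel argument that is always sufficient (_siftdown's pos
-- strictly decreases, _siftup's endpos - pos strictly decreases, the outer while pops one
-- element of deque+heap per iteration), so the fuel-exhaustion branches are never taken.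

-- _siftdown's while loop (walk up the parent chain; parentpos = (pos-1)>>1 and
-- parent = heap[parentpos] are inlined); heap[pos] = newitem is applied by the caller
def siftdownLoop (newitem : Int) : Nat → List Int → Nat → Nat → List Int × Nat
  | 0, heap, _, pos => (heap, pos)
  | fuel+1, heap, startpos, pos =>
    if startpos < pos then
      if newitem < heap.getD ((pos - 1) / 2) 0 then
        siftdownLoop newitem fuel (heap.set pos (heap.getD ((pos - 1) / 2) 0)) startpos ((pos - 1) / 2)
      else (heap, pos)
    else (heap, pos)

def siftdown (heap : List Int) (startpos pos : Nat) : List Int :=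
  let newitem := heap.getD pos 0
  let r := siftdownLoop newitem pos heap startpos pos
  r.1.set r.2 newitem

def heappush (heap : List Int) (item : Int) : List Int :=
  siftdown (heap ++ [item]) 0 heap.length

-- _siftup's childpos after the `if rightpos < endpos and not heap[childpos] < heap[rightpos]` step
def pickChild (heap : List Int) (pos endpos : Nat) : Nat :=
  if 2*pos+2 < endpos ∧ ¬ heap.getD (2*pos+1) 0 < heap.getD (2*pos+2) 0 then 2*pos+2 else 2*pos+1

-- _siftup's while loop (move the smaller child up, descend)
def siftupLoop : Nat → List Int → Nat → Nat → List Int × Nat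
  | 0, heap, pos, _ => (heap, pos)
  | fuel+1, heap, pos, endpos =>
    if 2*pos+1 < endpos then
      siftupLoop fuel (heap.set pos (heap.getD (pickChild heap pos endpos) 0)) (pickChild heap pos endpos) endpos
    else (heap, pos)

def siftup (heap : List Int) (pos : Nat) : List Int :=
  let newitem := heap.getD pos 0
  let r := siftupLoop heap.length heap pos heap.length
  siftdown (r.1.set r.2 newitem) pos r.2

-- heappop: lastelt = heap.pop() (IndexError on empty → none); if heap: swap root out and sift up
def heappop (heap : List Int) : Option (Int × List Int) :=
  match heap.getLast? with
  | none => none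
  | some lastelt =>
    if heap.dropLast.isEmpty then some (lastelt, heap.dropLast)
    else some (heap.dropLast.getD 0 0, siftup (heap.dropLast.set 0 lastelt) 0)

-- the inner `for i in range(len(ds_deq))` loop: popleft/push while the front date ≤ day, else break
def pushPhase (ds : List (Int × Int)) (heap : List Int) (day : Int) : List (Int × Int) × List Int :=
  match ds with
  | [] => ([], heap)
  | (d, s) :: rest => if d ≤ day then pushPhase rest (heappush heap (-s)) day else ((d, s) :: rest, heap)

-- the outer `while day < k` loop of A; every iteration moves some elements from ds_deq to
-- the heap and pops exactly one, so fuel = len(ds_deq) + len(heap) + 1 never runs out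
def loopA : Nat → Int → List (Int × Int) → List Int → Int → Int → Option Int
  | 0, _, _, _, _, _ => none
  | fuel+1, k, ds, heap, day, ans =>
    if day < k then
      match heappop (pushPhase ds heap day).2 with
      | none => none
      | some (v, h2) => loopA fuel k (pushPhase ds heap day).1 h2 (day + -v) (ans + 1)
    else some ans

def solution (stock : Int) (dates : List Int) (supplies : List Int) (k : Int) : Int :=
  (loopA ((dates.zip supplies).length + 1) k (dates.zip supplies) [] stock 0).getD 0

-- ===== PORT B =====
-- the inner `while pairs and pairs[0][0] <= day` loop: move reachable supplies to `available`
def fillB (ps : List (Int × Int)) (avail : List Int) (day : Int) : List (Int × Int) × List Int :=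
  match ps with
  | [] => ([], avail)
  | (d, s) :: rest => if d ≤ day then fillB rest (avail ++ [s]) day else ((d, s) :: rest, avail)

-- the `for j in range(1, len(available))` linear scan for the maximum and its first index
def findMax : List Int → Int → Nat → Nat → Int × Nat
  | [], best, bi, _ => (best, bi)
  | x :: rest, best, bi, j => if best < x then findMax rest x j (j+1) else findMax rest best bi (j+1)

-- the outer `while day < k` loop of B; as in A, one `available` element is removed per
-- iteration, so the same fuel is always sufficient
def loopB : Nat → Int → List (Int × Int) → List Int → Int → Int → Option Int
  | 0, _, _, _, _, _ => none
  | fuel+1, k, ps, avail, day, ans =>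
    if day < k then
      match (fillB ps avail day).2 with
      | [] => none
      | a0 :: restA =>
        loopB fuel k (fillB ps avail day).1 ((a0 :: restA).eraseIdx (findMax restA a0 0 1).2)
          (day + (findMax restA a0 0 1).1) (ans + 1)
    else some ans

def solution_alt (stock : Int) (dates : List Int) (supplies : List Int) (k : Int) : Int :=
  (loopB ((dates.zip supplies).length + 1) k (dates.zip supplies) [] stock 0).getD 0

-- ===== PRECONDITION & SPEC =====
-- stock plus the positive parts of the first i reachable supply amounts
def qsum (ps : List (Int × Int)) (stock : Int) (i : Nat) : Int :=
  stock + ((ps.take i).map (fun p => max p.2 0)).sum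

-- Pre_ excludes exactly the inputs on which A raises IndexError (heappop of an empty
-- heap): the factory runs out while day < k.  Closed form: for every prefix length i of
-- the zipped (date, supply) list, if stock plus the positive supplies of that prefix is
-- still < k, a further supply must be reachable (i < n and dates[i] ≤ that sum).
def Pre_solution (stock : Int) (dates : List Int) (supplies : List Int) (k : Int) : Prop :=
  ∀ i : Nat, i ≤ (dates.zip supplies).length →
    qsum (dates.zip supplies) stock i < k →
      i < (dates.zip supplies).length ∧ ((dates.zip supplies).getD i (0, 0)).1 ≤ qsum (dates.zip supplies) stock i

instance (stock : Int) (dates : List Int) (supplies : List Int) (k : Int) : Decidable (Pre_solution stock dates supplies k) := by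
  unfold Pre_solution; infer_instance

def pvWitness_solution : Int × List Int × List Int × Int := (0, [0, 2], [2, 3], 4)

def Spec_solution (stock : Int) (dates : List Int) (supplies : List Int) (k : Int) (out : Int) : Prop := out = solution_alt stock dates supplies k
instance (stock : Int) (dates : List Int) (supplies : List Int) (k : Int) (out : Int) : Decidable (Spec_solution stock dates supplies k out) := by unfold Spec_solution; infer_instance

-- ===== CLAIM (what is proved, stated in full; the proofs are below) =====
def Claim_equal_solution : Prop := ∀ (stock : Int) (dates : List Int) (supplies : List Int) (k : Int), Dom_solution stock dates supplies k → Pre_solution stock dates supplies k → Spec_solution stock dates supplies k (solution stock dates supplies k)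

-- ===== LEMMAS AND PROOFS =====

-- small getD/set/count helpers
theorem getD_set_self (l : List Int) (i : Nat) (a : Int) (h : i < l.length) :
    (l.set i a).getD i 0 = a := by
  rw [List.getD_eq_getElem _ _ (by simpa using h)]
  simp [List.getElem_set_self]

theorem getD_set_ne (l : List Int) (i j : Nat) (a : Int) (h : i ≠ j) :
    (l.set i a).getD j 0 = l.getD j 0 := by
  by_cases hj : j < l.length
  · rw [List.getD_eq_getElem _ _ (by simpa using hj), List.getD_eq_getElem _ _ hj,
      List.getElem_set_ne h]
  · rw [List.getD_eq_default _ _ (by simpa using hj), List.getD_eq_default _ _ (by omega)]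

theorem count_set (l : List Int) : ∀ (n : Nat) (a b : Int), n < l.length →
    (l.set n a).count b + (if l.getD n 0 = b then 1 else 0)
      = l.count b + (if a = b then 1 else 0) := by
  induction l with
  | nil => intro n a b h; simp at h
  | cons c t ih =>
    intro n a b h
    cases n with
    | zero => simp [List.count_cons]; split_ifs <;> omega
    | succ m =>
      have := ih m a b (by simpa using h)
      simp only [List.set_cons_succ, List.count_cons, List.getD_cons_succ]
      omega

theorem set_move_perm (l : List Int) (i j : Nat) (x : Int)
    (hi : i < l.length) (hj : j < l.length) (hij : i ≠ j) :
    ((l.set i (l.getD j 0)).set j x).Perm (l.set i x) := by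
  apply List.perm_iff_count.mpr
  intro b
  have h1 := count_set l i (l.getD j 0) b hi
  have h2 := count_set (l.set i (l.getD j 0)) j x b (by simpa using hj)
  have h3 := count_set l i x b hi
  rw [getD_set_ne l i j _ hij] at h2
  split_ifs at h1 h2 h3 <;> omega

theorem perm_cons_eraseIdx (l : List Int) : ∀ (n : Nat), n < l.length →
    l.Perm (l.getD n 0 :: l.eraseIdx n) := by
  induction l with
  | nil => intro n h; simp at h
  | cons c t ih =>
    intro n h
    cases n with
    | zero => simp
    | succ m =>
      have hm : m < t.length := by simpa using h
      simp only [List.getD_cons_succ, List.eraseIdx_cons_succ]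
      exact ((ih m hm).cons c).trans (List.Perm.swap _ _ _)

-- the binary-heap shape
def Edge (i j : Nat) : Prop := j = 2*i+1 ∨ j = 2*i+2

def IsHeap (l : List Int) : Prop :=
  ∀ i j, Edge i j → j < l.length → l.getD i 0 ≤ l.getD j 0

-- invariant of _siftdown's loop: conceptually newitem sits at the hole `pos`;
-- every edge not pointing into pos holds, and pos's children dominate pos's parent
def DInv (newitem : Int) (l : List Int) (pos : Nat) : Prop :=
  pos < l.length ∧
  (∀ i j, Edge i j → j < l.length → j ≠ pos →
    (l.set pos newitem).getD i 0 ≤ (l.set pos newitem).getD j 0) ∧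
  (∀ p c, Edge p pos → Edge pos c → c < l.length →
    (l.set pos newitem).getD p 0 ≤ (l.set pos newitem).getD c 0)

-- invariant of _siftup's loop: the hole at pos carries a stale value; edges not
-- incident to pos hold, and pos's children dominate pos's parent
def UInv (l : List Int) (pos : Nat) : Prop :=
  pos < l.length ∧
  (∀ i j, Edge i j → j < l.length → i ≠ pos → j ≠ pos → l.getD i 0 ≤ l.getD j 0) ∧
  (∀ p c, Edge p pos → Edge pos c → c < l.length → l.getD p 0 ≤ l.getD c 0)

theorem dinv_step (newitem : Int) (l : List Int) (pos : Nat)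
    (h : DInv newitem l pos) (hpos : 0 < pos)
    (hlt : newitem < l.getD ((pos - 1) / 2) 0) :
    DInv newitem (l.set pos (l.getD ((pos - 1) / 2) 0)) ((pos - 1) / 2) := by
  obtain ⟨hpl, hA1, hA2⟩ := h
  set ppos := (pos - 1) / 2 with hpp
  set parent := l.getD ppos 0 with hpar
  have hpplt : ppos < pos := by omega
  have hppl : ppos < l.length := by omega
  have hepp : Edge ppos pos := by unfold Edge; omega
  -- values of the conceptual arrays
  have bpos : ((l.set pos parent).set ppos newitem).getD pos 0 = parent := by
    rw [getD_set_ne _ _ _ _ (by omega), getD_set_self _ _ _ hpl]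
  have bppos : ((l.set pos parent).set ppos newitem).getD ppos 0 = newitem :=
    getD_set_self _ _ _ (by simpa using hppl)
  have bother : ∀ m, m ≠ pos → m ≠ ppos →
      ((l.set pos parent).set ppos newitem).getD m 0 = l.getD m 0 := by
    intro m h1 h2
    rw [getD_set_ne _ _ _ _ (by omega), getD_set_ne _ _ _ _ (by omega)]
  have apos : (l.set pos newitem).getD pos 0 = newitem := getD_set_self _ _ _ hpl
  have aother : ∀ m, m ≠ pos → (l.set pos newitem).getD m 0 = l.getD m 0 := by
    intro m h1; rw [getD_set_ne _ _ _ _ (by omega)]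
  refine ⟨by simpa using hppl, ?_, ?_⟩
  · intro i j hij hj hjp
    simp only [List.length_set] at hj
    by_cases hjpos : j = pos
    · have hip : i = ppos := by unfold Edge at hij; omega
      subst hjpos; subst hip
      rw [bppos, bpos]; omega
    · by_cases hipos : i = pos
      · subst hipos
        have := hA2 ppos j hepp hij hj
        rw [aother ppos (by omega), aother j (by omega)] at this
        rw [bpos, bother j (by omega) (by omega)]
        exact this
      · by_cases hippos : i = ppos
        · subst hippos
          have := hA1 ppos j hij hj (by omega)
          rw [aother ppos (by omega), aother j (by omega)] at this
          rw [bppos, bother j (by omega) (by omega)]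
          omega
        · have := hA1 i j hij hj (by omega)
          rw [aother i (by omega), aother j (by omega)] at this
          rw [bother i (by omega) (by omega), bother j (by omega) (by omega)]
          exact this
  · intro p c hp hc hcl
    simp only [List.length_set] at hcl
    have hppos0 : 0 < ppos := by unfold Edge at hp; omega
    have hpltp : p < ppos := by unfold Edge at hp; omega
    have hclt : ppos < c := by unfold Edge at hc; omega
    have hne1 : p ≠ pos := by omega
    have hne2 : p ≠ ppos := by omega
    have base : l.getD p 0 ≤ l.getD ppos 0 := by
      have := hA1 p ppos hp hppl (by omega)
      rwa [aother p (by omega), aother ppos (by omega)] at this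
    by_cases hcpos : c = pos
    · subst hcpos
      rw [bother p hne1 hne2, bpos]
      exact base
    · have hcppos : c ≠ ppos := by omega
      have step2 : l.getD ppos 0 ≤ l.getD c 0 := by
        have := hA1 ppos c hc hcl (by omega)
        rwa [aother ppos (by omega), aother c (by omega)] at this
      rw [bother p hne1 hne2, bother c (by omega) (by omega)]
      omega

theorem uinv_step (l : List Int) (pos : Nat) (h : UInv l pos)
    (hg : 2*pos+1 < l.length) :
    UInv (l.set pos (l.getD (pickChild l pos l.length) 0)) (pickChild l pos l.length) := by
  obtain ⟨hpl, hU1, hU2⟩ := h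
  set cp := pickChild l pos l.length with hcp
  have hcp_edge : Edge pos cp := by unfold Edge; rw [hcp]; unfold pickChild; split_ifs <;> omega
  have hcp_lt : cp < l.length := by rw [hcp]; unfold pickChild; split_ifs <;> omega
  have hpos_cp : pos < cp := by unfold Edge at hcp_edge; omega
  have sib_min : ∀ o, Edge pos o → o < l.length → l.getD cp 0 ≤ l.getD o 0 := by
    intro o ho hol
    rw [hcp]; unfold pickChild
    split_ifs with hc
    · unfold Edge at ho
      rcases ho with ho | ho
      · subst ho; omega
      · subst ho; exact le_refl _
    · unfold Edge at ho
      rcases ho with ho | ho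
      · subst ho; exact le_refl _
      · subst ho
        exact le_of_lt (Decidable.by_contra fun hb => hc ⟨by omega, hb⟩)
  have lother : ∀ m, m ≠ pos → (l.set pos (l.getD cp 0)).getD m 0 = l.getD m 0 := by
    intro m hm; rw [getD_set_ne _ _ _ _ (by omega)]
  have lpos : (l.set pos (l.getD cp 0)).getD pos 0 = l.getD cp 0 := getD_set_self _ _ _ hpl
  refine ⟨by simpa using hcp_lt, ?_, ?_⟩
  · intro i j hij hj hicp hjcp
    simp only [List.length_set] at hj
    by_cases hipos : i = pos
    · have hjpos : j ≠ pos := by unfold Edge at hij; omega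
      rw [hipos, lpos, lother j hjpos]
      exact sib_min j (hipos ▸ hij) hj
    · by_cases hjpos : j = pos
      · subst hjpos
        have := hU2 i cp hij hcp_edge hcp_lt
        rw [lother i hipos, lpos]
        exact this
      · have := hU1 i j hij hj hipos hjpos
        rw [lother i hipos, lother j hjpos]
        exact this
  · intro p c hp hc hcl
    simp only [List.length_set] at hcl
    have hppos : p = pos := by unfold Edge at hp hcp_edge; omega
    subst hppos
    have hccp : cp < c := by unfold Edge at hc; omega
    have := hU1 cp c hc hcl (by omega) (by omega)
    rw [lpos, lother c (by omega)]
    exact this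

theorem dloop_spec (newitem : Int) : ∀ (fuel pos : Nat) (l : List Int), pos ≤ fuel → DInv newitem l pos →
    IsHeap ((siftdownLoop newitem fuel l 0 pos).1.set (siftdownLoop newitem fuel l 0 pos).2 newitem) ∧
    ((siftdownLoop newitem fuel l 0 pos).1.set (siftdownLoop newitem fuel l 0 pos).2 newitem).Perm
      (l.set pos newitem) := by
  intro fuel
  induction fuel with
  | zero =>
    intro pos l hf hinv
    obtain ⟨hpl, hA1, hA2⟩ := hinv
    have hp0 : pos = 0 := by omega
    subst hp0
    constructor
    · intro i j hij hj
      simp only [List.length_set] at hj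
      have hj0 : j ≠ 0 := by unfold Edge at hij; omega
      exact hA1 i j hij hj hj0
    · exact List.Perm.refl _
  | succ n ih =>
    intro pos l hf hinv
    obtain ⟨hpl, hA1, hA2⟩ := hinv
    rw [siftdownLoop]
    split
    · rename_i hpos
      split
      · rename_i hlt
        have hstep := dinv_step newitem l pos ⟨hpl, hA1, hA2⟩ (by omega) hlt
        have hrec := ih ((pos - 1) / 2) _ (by omega) hstep
        refine ⟨hrec.1, hrec.2.trans ?_⟩
        exact set_move_perm l pos ((pos - 1) / 2) newitem hpl (by omega) (by omega)
      · rename_i hge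
        constructor
        · intro i j hij hj
          simp only [List.length_set] at hj
          by_cases hjpos : j = pos
          · have hip : i = (pos - 1) / 2 := by unfold Edge at hij; omega
            rw [hjpos, hip, getD_set_ne _ _ _ _ (by omega), getD_set_self _ _ _ hpl]
            exact le_of_not_gt hge
          · exact hA1 i j hij hj hjpos
        · exact List.Perm.refl _
    · rename_i hpos
      have hp0 : pos = 0 := by omega
      subst hp0
      constructor
      · intro i j hij hj
        simp only [List.length_set] at hj
        have hj0 : j ≠ 0 := by unfold Edge at hij; omega
        exact hA1 i j hij hj hj0
      · exact List.Perm.refl _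

theorem siftdown_spec (l : List Int) (pos : Nat) (h : DInv (l.getD pos 0) l pos) :
    IsHeap (siftdown l 0 pos) ∧ (siftdown l 0 pos).Perm l := by
  have hd := dloop_spec (l.getD pos 0) pos pos l (le_refl _) h
  have hset : l.set pos (l.getD pos 0) = l := by
    rw [List.getD_eq_getElem _ _ h.1]
    exact List.set_getElem_self h.1
  unfold siftdown
  exact ⟨hd.1, by rw [hset] at hd; exact hd.2⟩

theorem getD_append_len (h : List Int) (x : Int) : (h ++ [x]).getD h.length 0 = x := by
  rw [List.getD_eq_getElem _ _ (by simp)]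
  simp

theorem heappush_spec (h : List Int) (x : Int) (hh : IsHeap h) :
    IsHeap (heappush h x) ∧ (heappush h x).Perm (x :: h) := by
  have hinv : DInv ((h ++ [x]).getD h.length 0) (h ++ [x]) h.length := by
    refine ⟨by simp, ?_, ?_⟩
    · intro i j hij hj hjp
      simp only [List.length_append, List.length_cons, List.length_nil] at hj
      have hij' : i < j := by unfold Edge at hij; omega
      have hjl : j < h.length := by omega
      rw [getD_set_ne _ _ _ _ (by omega), getD_set_ne _ _ _ _ (by omega),
        List.getD_append _ _ _ _ (by omega), List.getD_append _ _ _ _ (by omega)]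
      exact hh i j hij hjl
    · intro p c hp hc hcl
      simp only [List.length_append, List.length_cons, List.length_nil] at hcl
      unfold Edge at hc; omega
  have := siftdown_spec (h ++ [x]) h.length hinv
  refine ⟨this.1, this.2.trans (List.perm_append_singleton x h)⟩

theorem root_le (l : List Int) (hh : IsHeap l) : ∀ j, j < l.length → l.getD 0 0 ≤ l.getD j 0 := by
  intro j
  induction j using Nat.strong_induction_on with
  | _ j ih =>
    intro hj
    cases Nat.eq_zero_or_pos j with
    | inl h0 => subst h0; exact le_refl _
    | inr h0 =>
      have hedge : Edge ((j - 1) / 2) j := by unfold Edge; omega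
      exact le_trans (ih ((j - 1) / 2) (by omega) (by omega)) (hh _ j hedge hj)

theorem uloop_spec : ∀ (fuel pos : Nat) (l : List Int) (endpos : Nat),
    endpos = l.length → endpos - pos ≤ fuel → UInv l pos →
    UInv (siftupLoop fuel l pos endpos).1 (siftupLoop fuel l pos endpos).2 ∧
    ¬ (2*(siftupLoop fuel l pos endpos).2+1 < endpos) ∧
    (siftupLoop fuel l pos endpos).1.length = l.length ∧
    ∀ x, ((siftupLoop fuel l pos endpos).1.set (siftupLoop fuel l pos endpos).2 x).Perm (l.set pos x) := by
  intro fuel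
  induction fuel with
  | zero =>
    intro pos l endpos he hf hu
    rw [siftupLoop]
    exact ⟨hu, by omega, rfl, fun x => List.Perm.refl _⟩
  | succ n ih =>
    intro pos l endpos he hf hu
    rw [siftupLoop]
    split
    · rename_i hg
      subst he
      have hstep := uinv_step l pos hu (by omega)
      have hcp_lt : pickChild l pos l.length < l.length := by unfold pickChild; split_ifs <;> omega
      have hpos_cp : pos < pickChild l pos l.length := by unfold pickChild; split_ifs <;> omega
      have hrec := ih (pickChild l pos l.length) (l.set pos (l.getD (pickChild l pos l.length) 0))
        l.length (by simp) (by simp; omega) hstep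
      refine ⟨hrec.1, hrec.2.1, by rw [hrec.2.2.1]; simp, ?_⟩
      intro x
      refine (hrec.2.2.2 x).trans ?_
      exact set_move_perm l pos (pickChild l pos l.length) x hu.1 hcp_lt (by omega)
    · exact ⟨hu, by assumption, rfl, fun x => List.Perm.refl _⟩

theorem siftup_spec (l : List Int) (hu : UInv l 0) :
    IsHeap (siftup l 0) ∧ (siftup l 0).Perm l := by
  have hul := uloop_spec l.length 0 l l.length rfl (by omega) hu
  set r := siftupLoop l.length l 0 l.length with hr
  obtain ⟨hu', hleaf, hlen, hperm⟩ := hul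
  have hr2 : r.2 < r.1.length := hu'.1
  -- DInv holds for the array with newitem written back at the leaf r.2
  have hdinv : DInv ((r.1.set r.2 (l.getD 0 0)).getD r.2 0) (r.1.set r.2 (l.getD 0 0)) r.2 := by
    have hget : (r.1.set r.2 (l.getD 0 0)).getD r.2 0 = l.getD 0 0 := getD_set_self _ _ _ hr2
    rw [hget]
    refine ⟨by simpa using hr2, ?_, ?_⟩
    · intro i j hij hj hjp
      simp only [List.length_set] at hj
      rw [List.set_set]
      have hir : i ≠ r.2 := by
        intro hie
        unfold Edge at hij
        rw [hlen] at hj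
        omega
      rw [getD_set_ne _ _ _ _ (by omega), getD_set_ne _ _ _ _ (by omega)]
      exact hu'.2.1 i j hij (by omega) hir hjp
    · intro p c hp hc hcl
      simp only [List.length_set] at hcl
      unfold Edge at hc
      rw [hlen] at hcl
      omega
  have hsd := siftdown_spec (r.1.set r.2 (l.getD 0 0)) r.2 hdinv
  have hfin : (siftup l 0) = siftdown (r.1.set r.2 (l.getD 0 0)) 0 r.2 := by
    rw [siftup]
  constructor
  · rw [hfin]; exact hsd.1
  · rw [hfin]
    refine hsd.2.trans ?_
    refine (hperm (l.getD 0 0)).trans ?_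
    rw [List.getD_eq_getElem _ _ hu.1]
    rw [List.set_getElem_self hu.1]

theorem heappop_spec (h : List Int) (hh : IsHeap h) (hne : h ≠ []) :
    ∃ v h2, heappop h = some (v, h2) ∧ h.Perm (v :: h2) ∧ IsHeap h2 ∧ ∀ x ∈ h, v ≤ x := by
  have hmin : ∀ x ∈ h, h.getD 0 0 ≤ x := by
    intro x hx
    obtain ⟨n, hn, heq⟩ := List.getElem_of_mem hx
    have := root_le h hh n hn
    rwa [List.getD_eq_getElem _ _ hn, heq] at this
  have hl : h.getLast? = some (h.getLast hne) := List.getLast?_eq_some_getLast hne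
  have hdrop : h.dropLast ++ [h.getLast hne] = h := List.dropLast_concat_getLast hne
  generalize hGL : h.getLast hne = L at hl hdrop
  unfold heappop
  rw [hl]
  dsimp only
  by_cases he : h.dropLast.isEmpty
  · rw [if_pos he]
    rw [List.isEmpty_iff] at he
    have hsing : h = [L] := by
      have := hdrop
      rw [he] at this
      simpa using this.symm
    refine ⟨L, h.dropLast, rfl, ?_, ?_, ?_⟩
    · rw [he, hsing]
    · rw [he]
      intro i j _ hj
      simp at hj
    · intro x hx
      rw [hsing] at hx
      simp at hx
      exact hx.ge
  · rw [if_neg he]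
    rw [List.isEmpty_iff] at he
    obtain ⟨r0, rt, hr⟩ : ∃ r0 rt, h.dropLast = r0 :: rt := by
      cases hd : h.dropLast with
      | nil => exact absurd hd he
      | cons a b => exact ⟨a, b, rfl⟩
    have hrlen : 0 < h.dropLast.length := by rw [hr]; simp
    have hulen : h.length = h.dropLast.length + 1 := by
      conv_lhs => rw [← hdrop]
      simp
    have hagree : ∀ m, m < h.dropLast.length → h.dropLast.getD m 0 = h.getD m 0 := by
      intro m hm
      conv_rhs => rw [← hdrop]
      rw [List.getD_append _ _ _ _ hm]
    have huinv : UInv (h.dropLast.set 0 L) 0 := by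
      refine ⟨by simpa using hrlen, ?_, ?_⟩
      · intro i j hij hj hi0 hj0
        simp only [List.length_set] at hj
        rw [getD_set_ne _ _ _ _ (by omega), getD_set_ne _ _ _ _ (by omega),
          hagree i (by unfold Edge at hij; omega), hagree j (by omega)]
        exact hh i j hij (by omega)
      · intro p c hp hc hcl
        unfold Edge at hp
        omega
    have hsu := siftup_spec (h.dropLast.set 0 L) huinv
    have hset : h.dropLast.set 0 L = L :: rt := by rw [hr]; rfl
    refine ⟨h.dropLast.getD 0 0, _, rfl, ?_, hsu.1, ?_⟩
    · have h0 : h.dropLast.getD 0 0 = r0 := by rw [hr]; rfl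
      have p2 : h.Perm (r0 :: (L :: rt)) := by
        rw [← hdrop, hr]
        exact (List.perm_append_singleton L rt).cons r0
      have p3 : (L :: rt).Perm (siftup (h.dropLast.set 0 L) 0) := by
        rw [← hset]
        exact hsu.2.symm
      rw [h0]
      exact p2.trans (p3.cons r0)
    · intro x hx
      rw [hagree 0 hrlen]
      exact hmin x hx

theorem phase_rel (day : Int) : ∀ (ds : List (Int × Int)) (heap avail : List Int),
    IsHeap heap → heap.Perm (avail.map (fun s => -s)) →
    (pushPhase ds heap day).1 = (fillB ds avail day).1 ∧
    IsHeap (pushPhase ds heap day).2 ∧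
    (pushPhase ds heap day).2.Perm ((fillB ds avail day).2.map (fun s => -s)) := by
  intro ds
  induction ds with
  | nil => intro heap avail hh hp; exact ⟨rfl, hh, hp⟩
  | cons p rest ih =>
    intro heap avail hh hp
    obtain ⟨d, s⟩ := p
    rw [pushPhase, fillB]
    split
    · have hpush := heappush_spec heap (-s) hh
      refine ih (heappush heap (-s)) (avail ++ [s]) hpush.1 ?_
      refine hpush.2.trans ?_
      have : ((avail ++ [s]).map (fun t => -t)) = avail.map (fun t => -t) ++ [-s] := by simp
      rw [this]
      exact ((hp.cons (-s)).trans (List.perm_append_singleton (-s) _).symm)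
    · exact ⟨rfl, hh, hp⟩

theorem findMax_spec : ∀ (l acc : List Int) (best : Int) (bi : Nat),
    bi < acc.length → acc.getD bi 0 = best → (∀ x ∈ acc, x ≤ best) →
    (findMax l best bi acc.length).2 < (acc ++ l).length ∧
    (acc ++ l).getD (findMax l best bi acc.length).2 0 = (findMax l best bi acc.length).1 ∧
    ∀ x ∈ acc ++ l, x ≤ (findMax l best bi acc.length).1 := by
  intro l
  induction l with
  | nil =>
    intro acc best bi hbi hget hbd
    simp only [findMax, List.append_nil]
    exact ⟨hbi, hget, hbd⟩
  | cons x rest ih =>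
    intro acc best bi hbi hget hbd
    rw [findMax]
    split
    · rename_i hlt
      have := ih (acc ++ [x]) x acc.length (by simp) (getD_append_len acc x)
        (by intro y hy; simp at hy; rcases hy with hy | hy
            · exact le_of_lt (lt_of_le_of_lt (hbd y hy) hlt)
            · omega)
      rw [List.length_append] at this
      simpa [List.append_assoc] using this
    · rename_i hge
      have := ih (acc ++ [x]) best bi (by simp; omega)
        (by rw [List.getD_append _ _ _ _ hbi]; exact hget)
        (by intro y hy; simp at hy; rcases hy with hy | hy
            · exact hbd y hy
            · omega)
      rw [List.length_append] at this
      simpa [List.append_assoc] using this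

theorem loops_eq : ∀ (fuel : Nat) (ds : List (Int × Int)) (heap avail : List Int) (day ans k : Int),
    IsHeap heap →
    heap.Perm (avail.map (fun s => -s)) →
    loopA fuel k ds heap day ans = loopB fuel k ds avail day ans := by
  intro fuel
  induction fuel with
  | zero => intro ds heap avail day ans k _ _; rfl
  | succ n ih =>
    intro ds heap avail day ans k hheap hperm
    rw [loopA, loopB]
    by_cases hd : day < k
    · simp only [if_pos hd]
      obtain ⟨hds, hH, hPm⟩ := phase_rel day ds heap avail hheap hperm
      cases hF : (fillB ds avail day).2 with
      | nil =>
        rw [hF] at hPm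
        have hP2 : (pushPhase ds heap day).2 = [] := by simpa using hPm.eq_nil
        rw [hP2]
        simp [heappop]
      | cons a0 restA =>
        rw [hF] at hPm
        have hPne : (pushPhase ds heap day).2 ≠ [] := by
          intro e
          rw [e] at hPm
          have := hPm.length_eq
          simp at this
        obtain ⟨v, h2, hpop, hvperm, hH2, hvmin⟩ := heappop_spec _ hH hPne
        rw [hpop]
        dsimp only
        have hfm := findMax_spec restA [a0] a0 0 (by simp) (by rfl)
          (by intro x hx; simp at hx; omega)
        simp only [List.length_cons, List.length_nil, List.singleton_append, Nat.zero_add] at hfm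
        obtain ⟨hbi, hget, hmax⟩ := hfm
        have hm1mem : (findMax restA a0 0 1).1 ∈ a0 :: restA := by
          rw [← hget, List.getD_eq_getElem _ _ hbi]
          exact List.getElem_mem hbi
        have hvmem : v ∈ (pushPhase ds heap day).2 := (hvperm.mem_iff).mpr (by simp)
        obtain ⟨sv, hsvmem, hsv⟩ := List.mem_map.mp (hPm.subset hvmem)
        have hv1 : v ≤ -(findMax restA a0 0 1).1 := by
          apply hvmin
          apply hPm.symm.subset
          exact List.mem_map.mpr ⟨_, hm1mem, rfl⟩
        have hv2 : -(findMax restA a0 0 1).1 ≤ v := by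
          have := hmax sv hsvmem
          omega
        have hv : v = -(findMax restA a0 0 1).1 := le_antisymm hv1 hv2
        have hep : (a0 :: restA).Perm ((findMax restA a0 0 1).1 :: (a0 :: restA).eraseIdx (findMax restA a0 0 1).2) := by
          have := perm_cons_eraseIdx (a0 :: restA) (findMax restA a0 0 1).2 hbi
          rwa [hget] at this
        have hperm2 : h2.Perm (((a0 :: restA).eraseIdx (findMax restA a0 0 1).2).map (fun s => -s)) := by
          have c1 : (v :: h2).Perm ((v :: ((a0 :: restA).eraseIdx (findMax restA a0 0 1).2).map (fun s => -s))) := by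
            refine (hvperm.symm.trans hPm).trans ?_
            have := hep.map (fun s : Int => -s)
            simp only [List.map_cons] at this
            rw [hv]
            exact this
          exact c1.cons_inv
        have hrec := ih (pushPhase ds heap day).1 h2 ((a0 :: restA).eraseIdx (findMax restA a0 0 1).2)
          (day + -v) (ans + 1) k hH2 hperm2
        rw [hv] at hrec ⊢
        rw [neg_neg] at hrec ⊢
        rw [hds] at hrec ⊢
        exact hrec
    · simp [hd]

-- ===== VERDICT (by name: the statement is the Claim_ definition above) =====
theorem solution_spec : Claim_equal_solution := by
  intro stock dates supplies k _ _
  unfold Spec_solution solution solution_alt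
  rw [loops_eq ((dates.zip supplies).length + 1) (dates.zip supplies) [] [] stock 0 k
    (by intro i j hij hj; simp at hj) (by simp)]
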